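-- pv_equiv track=rewrite | github.com/PMG-t/DS_Utils | _graphs.py | common_words_count
-- ===== SOURCE A (Python) =====
-- def common_words_count(rw):
--     dd = {}
--
--     for city in rw:
--         for word in rw[city]:
--
--             for city2 in rw:
--                 if word in rw[city2]:
--
--                     arco = (city, city2)
--                     if arco not in dd:
--                         dd[arco] = 0
--                     dd[arco] += 1
--
--     return dd
-- ===== SOURCE B (Python) =====
-- def common_words_count(rw):
--     # Faster: one pass builds a word -> ordered list of containing cities index,
--     # then only containing cities are visited per word occurrence.
--     cities = list(rw)
--     index = {}
--     for c2 in cities: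
--         for w in dict.fromkeys(rw[c2]):
--             index.setdefault(w, []).append(c2)
--     dd = {}
--     for city in cities:
--         for word in rw[city]:
--             for city2 in index[word]:
--                 dd[(city, city2)] = dd.get((city, city2), 0) + 1
--     return dd
-- ===== Notes on version B (the rewrite author's own statement) =====
-- stated objective: faster
-- what changed: B precomputes a word-to-(ordered list of containing cities) index in one pass over the dict, then for each word occurrence iterates only the cities that contain it, instead of A's rescan of every city's whole word list for every word of every city; intended as faster (measured 13.4x at n=1024; at n=4096 neither finished since the output itself can be quadratic in the number of cities).
import Mathlib
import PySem

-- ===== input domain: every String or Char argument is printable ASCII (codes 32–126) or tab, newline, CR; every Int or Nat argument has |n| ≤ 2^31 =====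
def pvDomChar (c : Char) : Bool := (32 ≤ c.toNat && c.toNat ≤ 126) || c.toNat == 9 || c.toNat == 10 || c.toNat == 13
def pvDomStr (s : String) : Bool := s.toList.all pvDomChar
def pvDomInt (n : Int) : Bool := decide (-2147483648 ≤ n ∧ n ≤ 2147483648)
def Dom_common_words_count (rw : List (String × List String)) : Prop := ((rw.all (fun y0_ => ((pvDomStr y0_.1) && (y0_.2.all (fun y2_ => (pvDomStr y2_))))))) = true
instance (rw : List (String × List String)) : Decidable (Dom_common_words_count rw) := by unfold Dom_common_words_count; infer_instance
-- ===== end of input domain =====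

-- B replaces A's rescan of every city per word with a precomputed word→containing-cities index; intended as faster (measured 13.4x at n=1024; at the largest probe size neither finished, the output itself can be quadratic).

-- ===== PORT A =====
def common_words_count (rw : List (String × List String)) : List (String × String × Int) :=
  let d := PySem.Dict.ofList rw
  let dd : PySem.Dict (String × String) Int :=
    d.keys.foldl (fun dd city =>
      (d.getD city []).foldl (fun dd word =>
        d.keys.foldl (fun dd city2 =>
          if (d.getD city2 []).contains word then
            let arco := (city, city2)
            let dd := if dd.contains arco then dd else dd.insert arco 0
            dd.insert arco (dd.getD arco 0 + 1)
          else dd) dd) dd) PySem.Dict.empty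
  dd.items.map (fun p => (p.1.1, p.1.2, p.2))

-- ===== PORT B =====
def common_words_count_alt (rw : List (String × List String)) : List (String × String × Int) :=
  let d := PySem.Dict.ofList rw
  let cities := d.keys
  let index : PySem.Dict String (List String) :=
    cities.foldl (fun idx c2 =>
      (PySem.List.dedup (d.getD c2 [])).foldl (fun idx w =>
        idx.modify w [] (· ++ [c2])) idx) PySem.Dict.empty
  let dd : PySem.Dict (String × String) Int :=
    cities.foldl (fun dd city =>
      (d.getD city []).foldl (fun dd word =>
        (index.getD word []).foldl (fun dd city2 =>
          dd.insert (city, city2) (dd.getD (city, city2) 0 + 1)) dd) dd) PySem.Dict.empty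
  dd.items.map (fun p => (p.1.1, p.1.2, p.2))

-- ===== PRECONDITION & SPEC =====
def Spec_common_words_count (rw : List (String × List String)) (out : List (String × String × Int)) : Prop := out = common_words_count_alt rw
instance (rw : List (String × List String)) (out : List (String × String × Int)) : Decidable (Spec_common_words_count rw out) := by unfold Spec_common_words_count; infer_instance

-- ===== CLAIM (what is proved, stated in full; the proofs are below) =====
def Claim_equal_common_words_count : Prop := ∀ (rw : List (String × List String)), Dom_common_words_count rw → Spec_common_words_count rw (common_words_count rw)

-- ===== LEMMAS AND PROOFS =====

-- A's "if arco not in dd: dd[arco]=0; dd[arco]+=1" is one insert of (old value or 0)+1.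
lemma pv_bump_eq (dd : PySem.Dict (String × String) Int) (a : String × String) :
    (if dd.contains a then dd else dd.insert a 0).insert a
      ((if dd.contains a then dd else dd.insert a 0).getD a 0 + 1)
    = dd.insert a (dd.getD a 0 + 1) := by
  by_cases h : dd.contains a
  · simp [h]
  · simp only [Bool.not_eq_true] at h
    simp [h, PySem.Dict.getD_insert_self, PySem.Dict.insert_insert_self,
      PySem.Dict.getD_of_not_contains]

-- In a nodup list, filtering for equality with w yields [w] or [].
lemma pv_filter_eq_of_nodup (l : List String) (hnd : l.Nodup) (w : String) :
    l.filter (fun x => x == w) = if w ∈ l then [w] else [] := by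
  have : l.filter (fun x => x == w) = List.replicate (l.count w) w := by
    simpa using List.filter_beq (l := l) (a := w)
  by_cases h : w ∈ l
  · rw [this, List.count_eq_one_of_mem hnd h]; simp [h]
  · rw [this, List.count_eq_zero.mpr h]; simp [h]

-- The index built by B maps w to exactly the cities (in key order) whose word list contains w.
lemma pv_index_getD (d : PySem.Dict String (List String)) (cities : List String)
    (w : String) (idx : PySem.Dict String (List String)) :
    (cities.foldl (fun idx c2 =>
      (PySem.List.dedup (d.getD c2 [])).foldl (fun idx w' =>
        idx.modify w' [] (· ++ [c2])) idx) idx).getD w []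
    = idx.getD w [] ++ cities.filter (fun c2 => (d.getD c2 []).contains w) := by
  induction cities generalizing idx with
  | nil => simp
  | cons c cs ih =>
    rw [List.foldl_cons, ih, List.filter_cons]
    have hstep : ((PySem.List.dedup (d.getD c [])).foldl
        (fun idx w' => idx.modify w' [] (· ++ [c])) idx).getD w []
        = idx.getD w [] ++ (if (d.getD c []).contains w then [c] else []) := by
      have hm : (PySem.List.dedup (d.getD c [])).foldl
          (fun idx w' => idx.modify w' [] (· ++ [c])) idx
          = ((PySem.List.dedup (d.getD c [])).map (fun w' => (w', c))).foldl
              (fun idx p => idx.modify p.1 [] (· ++ [p.2])) idx := by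
        rw [List.foldl_map]
      rw [hm, PySem.Dict.getD_foldl_modify_append]
      rw [List.filter_map]
      have : ((PySem.List.dedup (d.getD c [])).filter
            ((fun p => p.1 == w) ∘ (fun w' => (w', c)))) =
          (PySem.List.dedup (d.getD c [])).filter (fun x => x == w) := by
        rfl
      rw [this, pv_filter_eq_of_nodup _ (PySem.List.nodup_dedup _) w]
      by_cases h : w ∈ d.getD c []
      · simp [h]
      · simp [h]
    rw [hstep]
    by_cases h : w ∈ d.getD c []
    · simp [h, List.append_assoc]
    · simp [h]

-- The two accumulation loops build the same dict.
lemma pv_folds_eq (d : PySem.Dict String (List String)) :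
    d.keys.foldl (fun dd city =>
      (d.getD city []).foldl (fun dd word =>
        d.keys.foldl (fun dd city2 =>
          if (d.getD city2 []).contains word then
            (if dd.contains (city, city2) then dd else dd.insert (city, city2) 0).insert (city, city2)
              ((if dd.contains (city, city2) then dd else dd.insert (city, city2) 0).getD (city, city2) 0 + 1)
          else dd) dd) dd) (PySem.Dict.empty : PySem.Dict (String × String) Int)
    = d.keys.foldl (fun dd city =>
      (d.getD city []).foldl (fun dd word =>
        ((d.keys.foldl (fun idx c2 =>
            (PySem.List.dedup (d.getD c2 [])).foldl (fun idx w =>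
              idx.modify w [] (· ++ [c2])) idx) PySem.Dict.empty).getD word []).foldl
          (fun dd city2 =>
            dd.insert (city, city2) (dd.getD (city, city2) 0 + 1)) dd) dd) PySem.Dict.empty := by
  apply PySem.List.foldl_congr_mem
  intro dd city _
  apply PySem.List.foldl_congr_mem
  intro dd word _
  rw [pv_index_getD d d.keys word PySem.Dict.empty]
  have h1 : d.keys.foldl (fun dd city2 =>
      if (d.getD city2 []).contains word then
        (if dd.contains (city, city2) then dd else dd.insert (city, city2) 0).insert (city, city2)
          ((if dd.contains (city, city2) then dd else dd.insert (city, city2) 0).getD (city, city2) 0 + 1)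
      else dd) dd
      = d.keys.foldl (fun dd city2 =>
        if (d.getD city2 []).contains word then
          dd.insert (city, city2) (dd.getD (city, city2) 0 + 1)
        else dd) dd := by
    apply PySem.List.foldl_congr_mem
    intro dd c2 _
    by_cases h : word ∈ d.getD c2 []
    · simp [h, pv_bump_eq]
    · simp [h]
  rw [h1, PySem.List.foldl_if_eq_foldl_filter]
  simp

-- ===== VERDICT (by name: the statement is the Claim_ definition above) =====
theorem common_words_count_spec : Claim_equal_common_words_count := by
  intro rw _
  unfold Spec_common_words_count common_words_count common_words_count_alt
  exact congrArg (fun dd : PySem.Dict (String × String) Int =>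
    dd.items.map (fun p => (p.1.1, p.1.2, p.2))) (pv_folds_eq (PySem.Dict.ofList rw))
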